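-- pv_equiv track=rewrite | github.com/NgunyiGachie/DSA-Python | DataStructures/strings.py | solve
-- ===== SOURCE A (Python) =====
-- def solve(s):
--     frequencies = {}
--     for char in s:
--         if char in frequencies:
--             frequencies[char] += 1
--         else:
--             frequencies[char] = 1
--     values = list(frequencies.values())
--     unique_values = set(values)
--
--     if len(unique_values) == 1:
--         return True
--
--     if len(unique_values) == 2:
--         freq1, freq2 = unique_values
--         count1 = values.count(freq1)
--         count2 = values.count(freq2)
--
--         if (count1 == 1 and (freq1 == freq2 + 1 or freq1 == 1)) or \
--            (count2 == 1 and (freq2 == freq1 + 1 or freq2 == 1)):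
--             return True
--
--     return False
-- ===== SOURCE B (Python) =====
-- def solve(s):
--     # Simulate every possible single-character removal instead of distinct-frequency casework.
--     counts = {}
--     for ch in s:
--         counts[ch] = counts.get(ch, 0) + 1
--     vals = list(counts.values())
--     if not vals:
--         return False
--     if all(v == vals[0] for v in vals):
--         return True
--     for v in vals:
--         rest = vals.copy()
--         rest.remove(v)
--         if v > 1:
--             rest.append(v - 1)
--         if all(x == rest[0] for x in rest):
--             return True
--     return False
-- ===== Notes on version B (the rewrite author's own statement) =====
-- stated objective: alternative
-- what changed: Replaces A's distinct-frequency casework (set of values, count==1 and freq==other+1-or-1 conditions) by directly simulating each possible single removal: for each frequency, delete one occurrence from the multiset of counts and test whether the remaining counts are all equal.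
import Mathlib
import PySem

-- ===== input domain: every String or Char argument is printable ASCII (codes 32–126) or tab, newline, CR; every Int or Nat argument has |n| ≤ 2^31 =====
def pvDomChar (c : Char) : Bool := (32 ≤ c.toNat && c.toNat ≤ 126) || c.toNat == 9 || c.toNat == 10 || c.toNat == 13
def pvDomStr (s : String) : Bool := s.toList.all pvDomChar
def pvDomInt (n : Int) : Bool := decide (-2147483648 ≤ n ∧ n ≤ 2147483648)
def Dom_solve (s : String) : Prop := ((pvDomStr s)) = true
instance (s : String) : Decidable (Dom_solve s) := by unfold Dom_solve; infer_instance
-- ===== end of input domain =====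

-- B simulates each possible single removal on the multiset of character frequencies instead of A's distinct-frequency casework; same Bool on every input (alternative decomposition, no speed claim).

-- ===== PORT A =====
-- Python's `freq1, freq2 = unique_values` reads the set in hash order, which PySem does not model;
-- the condition below is symmetric in freq1/freq2, so the returned Bool does not depend on that
-- order and the port destructures the set in its insertion order.
def solve (s : String) : Bool :=
  let frequencies := s.toList.foldl
    (fun d c => if d.contains c then d.modify c 0 (· + 1) else d.insert c 1)
    (PySem.Dict.empty : PySem.Dict Char Int)
  let values := frequencies.values
  let unique_values := PySem.Set.ofList values
  if unique_values.length = 1 then true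
  else if unique_values.length = 2 then
    match unique_values with
    | [freq1, freq2] =>
      let count1 := values.count freq1
      let count2 := values.count freq2
      decide ((count1 = 1 ∧ (freq1 = freq2 + 1 ∨ freq1 = 1)) ∨
              (count2 = 1 ∧ (freq2 = freq1 + 1 ∨ freq2 = 1)))
    | _ => false
  else false

-- ===== PORT B =====
def solve_alt (s : String) : Bool :=
  let counts := s.toList.foldl (fun d c => d.insert c (d.getD c 0 + 1)) (PySem.Dict.empty : PySem.Dict Char Int)
  let vals := counts.values
  if vals = [] then false
  else if vals.all (fun v => v == vals.headD 0) then true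
  else vals.any (fun v =>
    let rest := (PySem.List.remove? vals v).getD [] ++ (if 1 < v then [v - 1] else [])
    rest.all (fun x => x == rest.headD 0))

-- ===== PRECONDITION & SPEC =====
def Spec_solve (s : String) (out : Bool) : Prop := out = solve_alt s
instance (s : String) (out : Bool) : Decidable (Spec_solve s out) := by unfold Spec_solve; infer_instance

-- ===== CLAIM (what is proved, stated in full; the proofs are below) =====
def Claim_equal_solve : Prop := ∀ (s : String), Dom_solve s → Spec_solve s (solve s)

-- ===== LEMMAS AND PROOFS =====

-- A's branch logic and B's branch logic as functions of the list of frequency values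
def pvAfun (values : List Int) : Bool :=
  let unique_values := PySem.Set.ofList values
  if unique_values.length = 1 then true
  else if unique_values.length = 2 then
    match unique_values with
    | [freq1, freq2] =>
      let count1 := values.count freq1
      let count2 := values.count freq2
      decide ((count1 = 1 ∧ (freq1 = freq2 + 1 ∨ freq1 = 1)) ∨
              (count2 = 1 ∧ (freq2 = freq1 + 1 ∨ freq2 = 1)))
    | _ => false
  else false

def pvBfun (vals : List Int) : Bool :=
  if vals = [] then false
  else if vals.all (fun v => v == vals.headD 0) then true
  else vals.any (fun v =>
    let rest := (PySem.List.remove? vals v).getD [] ++ (if 1 < v then [v - 1] else [])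
    rest.all (fun x => x == rest.headD 0))

def pvExtra (v : Int) : List Int := if 1 < v then [v - 1] else []

lemma pv_allEq_iff (l : List Int) :
    (l.all (fun v => v == l.headD 0) = true) ↔ (∀ x ∈ l, ∀ y ∈ l, x = y) := by
  cases l with
  | nil => simp
  | cons a t =>
    simp only [List.headD_cons, List.all_eq_true, beq_iff_eq]
    constructor
    · intro h x hx y hy; rw [h x hx, h y hy]
    · intro h x hx; exact h x hx a (List.mem_cons_self)

lemma pv_check_iff (vals : List Int) (v : Int) (hv : v ∈ vals) :
    ((let rest := (PySem.List.remove? vals v).getD [] ++ (if 1 < v then [v - 1] else []);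
      rest.all (fun x => x == rest.headD 0)) = true)
    ↔ (∀ x ∈ vals.erase v ++ pvExtra v, ∀ y ∈ vals.erase v ++ pvExtra v, x = y) := by
  show ((((PySem.List.remove? vals v).getD []) ++ _).all _ = true) ↔ _
  rw [PySem.List.remove?_eq_some_erase vals v hv]
  exact pv_allEq_iff _

lemma pv_two_aux (vals : List Int) (v w : Int) (hv : v ∈ vals) (hw : w ∈ vals) (hne : v ≠ w)
    (hall : ∀ x ∈ vals, x = v ∨ x = w) (h1v : 1 ≤ v) (h1w : 1 ≤ w) :
    (∀ x ∈ vals.erase v ++ pvExtra v, ∀ y ∈ vals.erase v ++ pvExtra v, x = y)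
      ↔ (vals.count v = 1 ∧ (v = w + 1 ∨ v = 1)) := by
  have hwE : w ∈ vals.erase v := (List.mem_erase_of_ne (Ne.symm hne)).mpr hw
  have hwR : w ∈ vals.erase v ++ pvExtra v := List.mem_append_left _ hwE
  constructor
  · intro hs
    have hcnt : vals.count v = 1 := by
      have hge : 0 < vals.count v := List.count_pos_iff.mpr hv
      by_contra hc
      have h2 : 0 < (vals.erase v).count v := by
        rw [List.count_erase_self]; omega
      have hvE : v ∈ vals.erase v := List.count_pos_iff.mp h2
      exact hne (hs v (List.mem_append_left _ hvE) w hwR)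
    refine ⟨hcnt, ?_⟩
    by_cases hlt : 1 < v
    · left
      have hm : v - 1 ∈ vals.erase v ++ pvExtra v := by
        apply List.mem_append_right; unfold pvExtra; simp [hlt]
      have := hs (v - 1) hm w hwR
      omega
    · right; omega
  · rintro ⟨hc1, hd⟩
    have hRb : ∀ x ∈ vals.erase v ++ pvExtra v, x = w := by
      intro x hx
      rcases List.mem_append.mp hx with h | h
      · rcases hall x (List.mem_of_mem_erase h) with rfl | hxw
        · exfalso
          have h1 : 0 < (vals.erase x).count x := List.count_pos_iff.mpr h
          rw [List.count_erase_self, hc1] at h1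
          omega
        · exact hxw
      · unfold pvExtra at h
        rcases hd with rfl | rfl
        · have h1 : (1 : Int) < w + 1 := by omega
          simp [h1] at h; omega
        · simp at h
    intro x hx y hy; rw [hRb x hx, hRb y hy]

lemma pv_stepA (d : PySem.Dict Char Int) (c : Char) :
    (if d.contains c then d.modify c 0 (· + 1) else d.insert c 1) = d.modify c 0 (· + 1) := by
  by_cases h : d.contains c = true
  · simp [h]
  · simp only [Bool.not_eq_true] at h
    have h0 : d.getD c 0 = 0 := by simp [PySem.Dict.getD_of_not_contains, h]
    simp only [h, if_neg Bool.false_ne_true]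
    unfold PySem.Dict.modify
    simp [h0]

lemma pv_solve_eq (s : String) :
    solve s = pvAfun (PySem.Dict.values (PySem.Dict.counter s.toList)) := by
  have hd : s.toList.foldl
      (fun d c => if d.contains c then d.modify c 0 (· + 1) else d.insert c 1)
      (PySem.Dict.empty : PySem.Dict Char Int)
      = PySem.Dict.counter s.toList := by
    rw [PySem.Dict.counter_eq_foldl]
    have hf : (fun (d : PySem.Dict Char Int) (c : Char) =>
        if d.contains c then d.modify c 0 (· + 1) else d.insert c 1)
        = (fun (d : PySem.Dict Char Int) (c : Char) => d.modify c 0 (· + 1)) :=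
      funext fun d => funext fun c => pv_stepA d c
    rw [hf]
  unfold solve pvAfun
  rw [hd]

lemma pv_solve_alt_eq (s : String) :
    solve_alt s = pvBfun (PySem.Dict.values (PySem.Dict.counter s.toList)) := by
  unfold solve_alt pvBfun
  rw [PySem.Dict.foldl_insert_getD_add_one_eq_counter]

lemma pv_vals_pos (s : String) :
    ∀ v ∈ PySem.Dict.values (PySem.Dict.counter s.toList), 1 ≤ v := by
  intro v hv
  have : PySem.Dict.values (PySem.Dict.counter s.toList)
      = (PySem.Set.ofList s.toList).map (fun k => (s.toList.count k : Int)) := by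
    show (PySem.Dict.counter s.toList).items.map (·.2) = _
    rw [PySem.Dict.items_counter]
    simp [List.map_map, Function.comp]
  rw [this] at hv
  obtain ⟨k, hk, rfl⟩ := List.mem_map.mp hv
  have hk' : k ∈ s.toList := (PySem.Set.mem_ofList _ _).mp hk
  have : 0 < s.toList.count k := List.count_pos_iff.mpr hk'
  omega

lemma pv_main (vals : List Int) (hpos : ∀ v ∈ vals, 1 ≤ v) :
    pvAfun vals = pvBfun vals := by
  rcases hu : PySem.Set.ofList vals with _ | ⟨a, _ | ⟨b, _ | ⟨c, w⟩⟩⟩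
  · -- no values: vals = []
    have hnil : vals = [] := by
      cases vals with
      | nil => rfl
      | cons x t =>
        have := (PySem.Set.mem_ofList (x :: t) x).mpr List.mem_cons_self
        rw [hu] at this; cases this
    subst hnil; rfl
  · -- one distinct value: both sides true
    have ha : a ∈ vals := (PySem.Set.mem_ofList vals a).mp (by rw [hu]; simp)
    have hall1 : ∀ x ∈ vals, x = a := by
      intro x hx
      have := (PySem.Set.mem_ofList vals x).mpr hx
      rw [hu] at this; simpa using this
    have hvne : vals ≠ [] := by intro h; rw [h] at ha; cases ha
    have hAll : vals.all (fun v => v == vals.headD 0) = true :=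
      (pv_allEq_iff vals).mpr (fun x hx y hy => by rw [hall1 x hx, hall1 y hy])
    have hA : pvAfun vals = true := by unfold pvAfun; rw [hu]; rfl
    have hB : pvBfun vals = true := by unfold pvBfun; rw [if_neg hvne, if_pos hAll]
    rw [hA, hB]
  · -- two distinct values: casework vs removal simulation
    have ha : a ∈ vals := (PySem.Set.mem_ofList vals a).mp (by rw [hu]; simp)
    have hb : b ∈ vals := (PySem.Set.mem_ofList vals b).mp (by rw [hu]; simp)
    have hnd := PySem.Set.nodup_ofList vals
    rw [hu] at hnd
    have hab : a ≠ b := by simp [List.nodup_cons] at hnd; tauto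
    have hall2 : ∀ x ∈ vals, x = a ∨ x = b := by
      intro x hx
      have := (PySem.Set.mem_ofList vals x).mpr hx
      rw [hu] at this; simpa using this
    have h1a : 1 ≤ a := hpos a ha
    have h1b : 1 ≤ b := hpos b hb
    have hvne : vals ≠ [] := by intro h; rw [h] at ha; cases ha
    have hAllF : ¬ (vals.all (fun v => v == vals.headD 0) = true) := by
      intro h
      exact hab ((pv_allEq_iff vals).mp h a ha b hb)
    have hA : pvAfun vals =
        decide ((vals.count a = 1 ∧ (a = b + 1 ∨ a = 1)) ∨
                (vals.count b = 1 ∧ (b = a + 1 ∨ b = 1))) := by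
      unfold pvAfun; rw [hu]; rfl
    have hB : pvBfun vals = vals.any (fun v =>
        let rest := (PySem.List.remove? vals v).getD [] ++ (if 1 < v then [v - 1] else [])
        rest.all (fun x => x == rest.headD 0)) := by
      unfold pvBfun; rw [if_neg hvne, if_neg hAllF]
    rw [hA, hB, Bool.eq_iff_iff]
    rw [decide_eq_true_eq, List.any_eq_true]
    constructor
    · rintro (⟨hc, hd⟩ | ⟨hc, hd⟩)
      · exact ⟨a, ha, (pv_check_iff vals a ha).mpr
          ((pv_two_aux vals a b ha hb hab hall2 h1a h1b).mpr ⟨hc, hd⟩)⟩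
      · exact ⟨b, hb, (pv_check_iff vals b hb).mpr
          ((pv_two_aux vals b a hb ha (Ne.symm hab)
            (fun x hx => (hall2 x hx).symm) h1b h1a).mpr ⟨hc, hd⟩)⟩
    · rintro ⟨v, hv, hchk⟩
      rcases hall2 v hv with rfl | rfl
      · exact Or.inl ((pv_two_aux vals v b hv hb hab hall2 h1a h1b).mp
          ((pv_check_iff vals v hv).mp hchk))
      · exact Or.inr ((pv_two_aux vals v a hv ha (Ne.symm hab)
          (fun x hx => (hall2 x hx).symm) h1b h1a).mp
          ((pv_check_iff vals v hv).mp hchk))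
  · -- three or more distinct values: both sides false
    have ha : a ∈ vals := (PySem.Set.mem_ofList vals a).mp (by rw [hu]; simp)
    have hb : b ∈ vals := (PySem.Set.mem_ofList vals b).mp (by rw [hu]; simp)
    have hc : c ∈ vals := (PySem.Set.mem_ofList vals c).mp (by rw [hu]; simp)
    have hnd := PySem.Set.nodup_ofList vals
    rw [hu] at hnd
    simp only [List.nodup_cons, List.mem_cons, not_or] at hnd
    have hab : a ≠ b := hnd.1.1
    have hac : a ≠ c := hnd.1.2.1
    have hbc : b ≠ c := hnd.2.1.1
    have hvne : vals ≠ [] := by intro h; rw [h] at ha; cases ha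
    have hAllF : ¬ (vals.all (fun v => v == vals.headD 0) = true) := by
      intro h
      exact hab ((pv_allEq_iff vals).mp h a ha b hb)
    have hAnyF : (vals.any (fun v =>
        let rest := (PySem.List.remove? vals v).getD [] ++ (if 1 < v then [v - 1] else [])
        rest.all (fun x => x == rest.headD 0))) = false := by
      rw [Bool.eq_false_iff]
      intro h
      rw [List.any_eq_true] at h
      obtain ⟨v, hv, hchk⟩ := h
      have hs := (pv_check_iff vals v hv).mp hchk
      obtain ⟨x, y, hx, hy, hxy, hxv, hyv⟩ :
          ∃ x y, x ∈ vals ∧ y ∈ vals ∧ x ≠ y ∧ x ≠ v ∧ y ≠ v := by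
        by_cases hva : v = a
        · subst hva; exact ⟨b, c, hb, hc, hbc, Ne.symm hab, Ne.symm hac⟩
        · by_cases hvb : v = b
          · subst hvb; exact ⟨a, c, ha, hc, hac, hab, Ne.symm hbc⟩
          · exact ⟨a, b, ha, hb, hab, fun h' => hva h'.symm, fun h' => hvb h'.symm⟩
      have hxE : x ∈ vals.erase v ++ pvExtra v :=
        List.mem_append_left _ ((List.mem_erase_of_ne hxv).mpr hx)
      have hyE : y ∈ vals.erase v ++ pvExtra v :=
        List.mem_append_left _ ((List.mem_erase_of_ne hyv).mpr hy)
      exact hxy (hs x hxE y hyE)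
    have hl1 : ¬ ((a :: b :: c :: w).length = 1) := by simp
    have hl2 : ¬ ((a :: b :: c :: w).length = 2) := by simp
    have hA : pvAfun vals = false := by
      unfold pvAfun; rw [hu]; rw [if_neg hl1, if_neg hl2]
    have hB : pvBfun vals = false := by
      unfold pvBfun; rw [if_neg hvne, if_neg hAllF, hAnyF]
    rw [hA, hB]

-- ===== VERDICT (by name: the statement is the Claim_ definition above) =====
theorem solve_spec : Claim_equal_solve := by
  intro s _
  unfold Spec_solve
  rw [pv_solve_eq, pv_solve_alt_eq, pv_main _ (pv_vals_pos s)]
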